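-- pv_equiv track=rewrite | github.com/endomorphosis/ipfs_datasets_py | ipfs_datasets_py/processors/legal_data/claim_intake.py | _has_fact_type
-- ===== SOURCE A (Python) =====
-- from typing import Any, Dict, List
--
-- def _has_fact_type(canonical_facts: List[Dict[str, Any]], fact_types: List[str]) -> bool:
--     normalized_fact_types = {str(item or "").strip().lower() for item in fact_types if item}
--     if not normalized_fact_types:
--         return False
--     for fact in canonical_facts:
--         if not isinstance(fact, dict):
--             continue
--         if str(fact.get("fact_type") or "").strip().lower() in normalized_fact_types:
--             return True
--     return False
-- ===== SOURCE B (Python) =====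
-- def _has_fact_type(canonical_facts, fact_types):
--     # Sort both normalized key lists and detect a common element with a
--     # two-pointer merge walk (no hash set, no membership loop).
--     wanted = sorted(str(item or "").strip().lower() for item in fact_types if item)
--     keys = sorted(str(fact.get("fact_type") or "").strip().lower()
--                   for fact in canonical_facts if isinstance(fact, dict))
--     i = j = 0
--     while i < len(wanted) and j < len(keys):
--         if wanted[i] == keys[j]:
--             return True
--         if wanted[i] < keys[j]:
--             i += 1
--         else:
--             j += 1
--     return False
-- ===== Notes on version B (the rewrite author's own statement) =====
-- stated objective: alternative
-- what changed: Replaced A's build-a-hash-set-then-scan-with-membership strategy by sorting both normalized key lists and detecting a common element with a two-pointer merge walk over the two sorted lists.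
import Mathlib
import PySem

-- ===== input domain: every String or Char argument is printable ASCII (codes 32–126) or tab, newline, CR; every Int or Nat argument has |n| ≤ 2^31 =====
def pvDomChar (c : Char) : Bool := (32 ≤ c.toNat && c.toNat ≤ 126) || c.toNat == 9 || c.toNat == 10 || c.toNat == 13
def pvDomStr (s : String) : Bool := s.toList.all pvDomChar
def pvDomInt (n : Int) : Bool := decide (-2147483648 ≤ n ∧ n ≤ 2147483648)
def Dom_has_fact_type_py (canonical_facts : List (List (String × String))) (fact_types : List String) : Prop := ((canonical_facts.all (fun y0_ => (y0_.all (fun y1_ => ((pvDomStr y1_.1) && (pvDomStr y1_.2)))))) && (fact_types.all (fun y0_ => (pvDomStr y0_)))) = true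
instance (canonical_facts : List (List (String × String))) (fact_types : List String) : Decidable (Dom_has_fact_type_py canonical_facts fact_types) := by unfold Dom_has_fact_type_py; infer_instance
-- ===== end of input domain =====

-- B replaces A's hash-set-membership scan by sorting both normalized key lists and running a
-- two-pointer merge walk to detect a common element (alternative algorithm, no set).

-- str(x).strip().lower() on a string x (shared normalization expression of both Pythons)
def pvNorm (s : String) : String := PySem.Str.lower (PySem.Str.strip s)
-- str(fact.get("fact_type") or "").strip().lower()  (assoc-list dict: first-match lookup)
def pvFactKey (fact : List (String × String)) : String :=
  pvNorm ((fact.lookup "fact_type").getD "")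

-- ===== PORT A =====
-- {str(item or "").strip().lower() for item in fact_types if item}
def pvNormTypes (fact_types : List String) : PySem.Set String :=
  PySem.Set.ofList ((fact_types.filter (fun item => item != "")).map pvNorm)

-- for fact in canonical_facts: if key in normalized: return True   (isinstance always holds under the type)
def pvALoop (normalized : PySem.Set String) : List (List (String × String)) → Bool
  | [] => false
  | fact :: rest =>
      if PySem.Set.contains normalized (pvFactKey fact) then true
      else pvALoop normalized rest

def has_fact_type_py (canonical_facts : List (List (String × String))) (fact_types : List String) : Bool :=
  let normalized := pvNormTypes fact_types
  if normalized = [] then false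
  else pvALoop normalized canonical_facts

-- ===== PORT B =====
-- two-pointer merge walk of Source B over the two sorted lists
def pvWalk : List String → List String → Bool
  | [], _ => false
  | _ :: _, [] => false
  | a :: as, b :: bs =>
      if a == b then true
      else if a < b then pvWalk as (b :: bs)
      else pvWalk (a :: as) bs
termination_by xs ys => xs.length + ys.length
decreasing_by all_goals simp

def has_fact_type_py_alt (canonical_facts : List (List (String × String))) (fact_types : List String) : Bool :=
  let wanted := PySem.List.sorted ((fact_types.filter (fun item => item != "")).map pvNorm) (fun x => x) false
  let keys := PySem.List.sorted (canonical_facts.map pvFactKey) (fun x => x) false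
  pvWalk wanted keys

-- ===== PRECONDITION & SPEC =====
def Spec_has_fact_type_py (canonical_facts : List (List (String × String))) (fact_types : List String) (out : Bool) : Prop := out = has_fact_type_py_alt canonical_facts fact_types
instance (canonical_facts : List (List (String × String))) (fact_types : List String) (out : Bool) : Decidable (Spec_has_fact_type_py canonical_facts fact_types out) := by unfold Spec_has_fact_type_py; infer_instance

-- ===== CLAIM =====
def Claim_equal_has_fact_type_py : Prop := ∀ (canonical_facts : List (List (String × String))) (fact_types : List String), Dom_has_fact_type_py canonical_facts fact_types → Spec_has_fact_type_py canonical_facts fact_types (has_fact_type_py canonical_facts fact_types)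

-- ===== LEMMAS AND PROOFS =====

-- Both sides decide the same proposition: ∃ truthy t ∈ fact_types, ∃ f ∈ canonical_facts, key f = norm t.

theorem pvWalk_iff (xs ys : List String) :
    xs.Pairwise (· ≤ ·) → ys.Pairwise (· ≤ ·) →
    (pvWalk xs ys = true ↔ ∃ x ∈ xs, x ∈ ys) := by
  induction xs, ys using pvWalk.induct with
  | case1 ys => intro _ _; simp [pvWalk]
  | case2 a as => intro _ _; simp [pvWalk]
  | case3 a as b bs he =>
      intro _ _
      rw [pvWalk, if_pos he]
      have he' := beq_iff_eq.mp he
      simp only [true_iff]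
      exact ⟨a, List.mem_cons_self .., he' ▸ List.mem_cons_self ..⟩
  | case4 a as b bs he hlt ih =>
      intro hx hy
      rw [pvWalk, if_neg he, if_pos hlt, ih (List.Pairwise.of_cons hx) hy]
      constructor
      · rintro ⟨x, hxs, hys⟩; exact ⟨x, List.mem_cons_of_mem _ hxs, hys⟩
      · rintro ⟨x, hxs, hys⟩
        rcases List.mem_cons.mp hxs with rfl | hxs'
        · -- x = a lies in b :: bs, but every element there is ≥ b > a
          rcases List.mem_cons.mp hys with heq | hys'
          · exact absurd (beq_iff_eq.mpr heq) he
          · exact absurd (lt_of_lt_of_le hlt (List.rel_of_pairwise_cons hy hys')) (lt_irrefl _)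
        · exact ⟨x, hxs', hys⟩
  | case5 a as b bs he hlt ih =>
      intro hx hy
      rw [pvWalk, if_neg he, if_neg hlt, ih hx (List.Pairwise.of_cons hy)]
      have hba : b < a := lt_of_le_of_ne (not_lt.mp hlt) (fun h => he (beq_iff_eq.mpr h.symm))
      constructor
      · rintro ⟨x, hxs, hys⟩; exact ⟨x, hxs, List.mem_cons_of_mem _ hys⟩
      · rintro ⟨x, hxs, hys⟩
        rcases List.mem_cons.mp hys with rfl | hys'
        · rcases List.mem_cons.mp hxs with rfl | hxs'
          · exact absurd (beq_iff_eq.mpr rfl) he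
          · exact absurd (List.rel_of_pairwise_cons hx hxs') (not_le.mpr hba)
        · exact ⟨x, hxs, hys'⟩

theorem pvALoop_iff (n : PySem.Set String) (cf : List (List (String × String))) :
    pvALoop n cf = true ↔ ∃ f ∈ cf, pvFactKey f ∈ n := by
  induction cf with
  | nil => simp [pvALoop]
  | cons f rest ih =>
      simp only [pvALoop]
      by_cases h : PySem.Set.contains n (pvFactKey f) = true
      · simp only [h, if_true, true_iff]
        exact ⟨f, List.mem_cons_self .., (PySem.Set.contains_iff ..).mp h⟩
      · rw [if_neg h]
        simp only [ih, List.mem_cons]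
        constructor
        · rintro ⟨g, hg, hk⟩; exact ⟨g, Or.inr hg, hk⟩
        · rintro ⟨g, (rfl | hg), hk⟩
          · exact absurd ((PySem.Set.contains_iff ..).mpr hk) h
          · exact ⟨g, hg, hk⟩

theorem hasA_iff (cf : List (List (String × String))) (ft : List String) :
    has_fact_type_py cf ft = true ↔ ∃ t ∈ ft, t ≠ "" ∧ ∃ f ∈ cf, pvFactKey f = pvNorm t := by
  unfold has_fact_type_py
  by_cases h : pvNormTypes ft = []
  · rw [if_pos h]
    simp only [Bool.false_eq_true, false_iff]
    rintro ⟨t, ht, hne, _⟩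
    have : pvNorm t ∈ pvNormTypes ft := by
      unfold pvNormTypes
      rw [PySem.Set.mem_ofList]
      exact List.mem_map_of_mem (List.mem_filter.mpr ⟨ht, by simpa using hne⟩)
    simp [h] at this
  · rw [if_neg h, pvALoop_iff]
    unfold pvNormTypes
    simp only [PySem.Set.mem_ofList, List.mem_map, List.mem_filter]
    constructor
    · rintro ⟨f, hf, t, ⟨ht, hne⟩, hk⟩
      exact ⟨t, ht, by simpa using hne, f, hf, hk.symm⟩
    · rintro ⟨t, ht, hne, f, hf, hk⟩
      exact ⟨f, hf, t, ⟨ht, by simpa using hne⟩, hk.symm⟩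

-- ===== VERDICT =====
theorem has_fact_type_py_spec : Claim_equal_has_fact_type_py := by
  intro cf ft _
  show has_fact_type_py cf ft = has_fact_type_py_alt cf ft
  rw [Bool.eq_iff_iff, hasA_iff]
  unfold has_fact_type_py_alt
  rw [pvWalk_iff _ _ (PySem.List.sorted_pairwise ..) (PySem.List.sorted_pairwise ..)]
  simp only [PySem.List.mem_sorted, List.mem_map, List.mem_filter]
  constructor
  · rintro ⟨t, ht, hne, f, hf, hk⟩
    exact ⟨pvNorm t, ⟨t, ⟨ht, by simpa using hne⟩, rfl⟩, f, hf, hk⟩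
  · rintro ⟨x, ⟨t, ⟨ht, hne⟩, rfl⟩, f, hf, hk⟩
    exact ⟨t, ht, by simpa using hne, f, hf, hk⟩
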